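-- pv_equiv track=rewrite | github.com/XDDXMT/HTML_learn | 自动判断html/app.py | check_html_closing_tags
-- ===== SOURCE A (Python) =====
-- def check_html_closing_tags(html_code):
--     stack = []
--     i = 0
--     while i < len(html_code):
--         if html_code[i] == '<':
--             end = html_code.find('>', i)
--             if end == -1:  # 没有找到结束标记
--                 return "HTML 格式错误: 标签未闭合"
--
--             tag_content = html_code[i + 1:end].strip()
--             if tag_content.startswith('/'):  # 关闭标签
--                 tag_name = tag_content[1:].split()[0]  # 取得标签名
--                 if stack and stack[-1] == tag_name:
--                     stack.pop()  # 匹配，弹出栈顶标签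
--                 elif tag_name not in ['head', 'html']:  # 只在不是 head 或 html 标签时返回错误
--                     return f"未正确闭合的标签: <{tag_name}>"
--             else:  # 开放标签
--                 tag_name = tag_content.split()[0]  # 取标签名
--                 if tag_name not in ['head', 'html', '!DOCTYPE', 'meta']:  # 跳过<head>和<html>标签
--                     if not tag_content.endswith('/'):  # 非自闭合标签
--                         stack.append(tag_name)
--
--             i = end + 1  # 更新位置到标签结束之后
--         else:
--             i += 1  # 如果不是标签，继续向后移动
--
--     if stack:  # 如果栈不为空，说明有未闭合的标签
--         return f"未正确闭合的标签: <{', '.join(stack)}>"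
--
--     return "所有标签闭合正确！"
-- ===== SOURCE B (Python) =====
-- def _parse(tokens, name):
--     """Recursive-descent: consume tokens of one element's children.
--
--     Returns ('err', msg) on a mismatched close tag, ('ok', rest) when the
--     close tag matching `name` was consumed, or ('eof', unclosed) when the
--     tokens ran out (`unclosed` = names opened below this frame, in open order).
--     """
--     while tokens:
--         tc = tokens[0]
--         if tc.startswith('/'):
--             n = tc[1:].split()[0]
--             if name is not None and n == name:
--                 return ('ok', tokens[1:])
--             if n in ('head', 'html'):
--                 tokens = tokens[1:]
--                 continue
--             return ('err', f"未正确闭合的标签: <{n}>")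
--         n = tc.split()[0]
--         if n in ('head', 'html', '!DOCTYPE', 'meta') or tc.endswith('/'):
--             tokens = tokens[1:]
--             continue
--         r = _parse(tokens[1:], n)
--         if r[0] == 'err':
--             return r
--         if r[0] == 'eof':
--             return ('eof', [n] + r[1])
--         tokens = r[1]
--     return ('eof', [])
--
--
-- def check_html_closing_tags(html_code):
--     # Each '>' closes at most one tag: in the chunk before it, the tag body
--     # starts right after the chunk's first '<'.  A '<' in the final chunk has
--     # no terminating '>' at all.
--     chunks = html_code.split('>')
--     tokens = [c[c.find('<') + 1:].strip() for c in chunks[:-1] if '<' in c]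
--     kind, val = _parse(tokens, None)
--     if kind == 'err':
--         return val
--     if '<' in chunks[-1]:
--         return "HTML 格式错误: 标签未闭合"
--     if val:
--         return f"未正确闭合的标签: <{', '.join(val)}>"
--     return "所有标签闭合正确！"
-- ===== Notes on version B (the rewrite author's own statement) =====
-- stated objective: alternative
-- what changed: B replaces A's explicit-stack character scan by a two-stage design: tokenize tag bodies by splitting the string on '>' (each chunk's first '<' starts the tag that this '>' closes), then validate nesting with a recursive-descent parser whose call stack replaces A's explicit stack (each open tag recurses into its children and returns when its matching close tag is consumed; at end-of-input the unwinding recursion collects the unclosed names in open order).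
-- outside the precondition, e.g. on check_html_closing_tags('</p><>'): A returns '未正确闭合的标签: <p>', B returns '未正确闭合的标签: <p>'
import Mathlib
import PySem

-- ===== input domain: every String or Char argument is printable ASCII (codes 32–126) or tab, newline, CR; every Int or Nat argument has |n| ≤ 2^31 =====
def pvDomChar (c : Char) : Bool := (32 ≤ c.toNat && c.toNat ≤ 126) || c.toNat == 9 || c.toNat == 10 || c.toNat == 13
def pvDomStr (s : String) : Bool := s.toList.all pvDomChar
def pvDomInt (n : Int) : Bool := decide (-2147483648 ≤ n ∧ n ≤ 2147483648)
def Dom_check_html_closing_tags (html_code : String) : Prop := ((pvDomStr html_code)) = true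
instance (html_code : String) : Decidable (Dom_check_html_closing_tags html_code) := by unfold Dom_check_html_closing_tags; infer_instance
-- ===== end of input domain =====

-- B trades A's explicit-stack character scan for split-on-'>' tokenization followed by a
-- recursive-descent parser (the call stack replaces A's explicit stack); a timing run
-- measured B faster by a constant factor. Return values only (no argument is mutated).

-- shared message builders (identical literal strings in both Pythons)
def pvUnclosedMsg : String := "HTML 格式错误: 标签未闭合"
def pvTagErr (name : List Char) : String := "未正确闭合的标签: <" ++ String.ofList name ++ ">"
-- A's final check; its stack is kept most-recent-first (push = cons), so the Python
-- append-order join is a join over the reverse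
def pvFinal (stack : List (List Char)) : String :=
  if stack ≠ [] then
    "未正确闭合的标签: <" ++ String.ofList (PySem.Chars.join [',', ' '] stack.reverse) ++ ">"
  else "所有标签闭合正确！"

-- ===== PORT A =====
-- the per-tag branch block of A, verbatim (tc is the stripped tag content);
-- `.inl` = early error return, `.inr` = the updated stack.
-- On '<>'-style tags Python raises IndexError at split()[0]; excluded by Pre_, sentinel returned.
def stepA (tc : List Char) (stack : List (List Char)) : Sum String (List (List Char)) :=
  if PySem.Chars.startswith tc ['/'] then
    match PySem.Chars.split₀ (tc.drop 1) with
    | [] => Sum.inl "pvIndexErrorA"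
    | n :: _ =>
      match stack with
      | top :: rest =>
        if top = n then Sum.inr rest
        else if n = "head".toList ∨ n = "html".toList then Sum.inr (top :: rest)
        else Sum.inl (pvTagErr n)
      | [] => if n = "head".toList ∨ n = "html".toList then Sum.inr [] else Sum.inl (pvTagErr n)
  else
    match PySem.Chars.split₀ tc with
    | [] => Sum.inl "pvIndexErrorA"
    | n :: _ =>
      if (n ≠ "head".toList ∧ n ≠ "html".toList ∧ n ≠ "!DOCTYPE".toList ∧ n ≠ "meta".toList)
          ∧ PySem.Chars.endswith tc ['/'] = false
      then Sum.inr (n :: stack) else Sum.inr stack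

-- A's while-loop over the characters; `rs.idxOf? '>'` is exactly Python's find('>', i)
-- (the character at i is '<' ≠ '>', so the search effectively starts at i+1).
def loopA : List Char → List (List Char) → String
  | [], stack => pvFinal stack
  | c :: rs, stack =>
    if c = '<' then
      match rs.idxOf? '>' with
      | none => pvUnclosedMsg
      | some j =>
        match stepA (PySem.Chars.strip (rs.take j)) stack with
        | Sum.inl e => e
        | Sum.inr st => loopA (rs.drop (j + 1)) st
    else loopA rs stack
  termination_by cs _ => cs.length
  decreasing_by all_goals (simp [List.length_drop]; try omega)

def check_html_closing_tags (html_code : String) : String :=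
  loopA html_code.toList []

-- ===== PORT B =====
-- Source B's _parse result: ('err', msg) | ('ok', rest) | ('eof', unclosed-names)
inductive PRes where
  | err (msg : String)
  | ok (rest : List (List Char))
  | eof (names : List (List Char))

-- Source B's _parse, verbatim (while-loop = tail recursion on `tokens`); `fuel` only totalizes the
-- Lean recursion: it starts above tokens.length and every recursive call shortens the token list,
-- so the fuel-0 branch is unreachable.  Python's IndexError at split()[0] (empty tag body) is the
-- sentinel branch, excluded by Pre_.
def parseB (fuel : Nat) (tokens : List (List Char)) (name : Option (List Char)) : PRes :=
  match fuel with
  | 0 => PRes.eof []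
  | fuel + 1 =>
    match tokens with
    | [] => PRes.eof []
    | tc :: rest =>
      if PySem.Chars.startswith tc ['/'] then
        match PySem.Chars.split₀ (tc.drop 1) with
        | [] => PRes.err "pvIndexErrorB"
        | n :: _ =>
          if name = some n then PRes.ok rest
          else if n = "head".toList ∨ n = "html".toList then parseB fuel rest name
          else PRes.err (pvTagErr n)
      else
        match PySem.Chars.split₀ tc with
        | [] => PRes.err "pvIndexErrorB"
        | n :: _ =>
          if (n = "head".toList ∨ n = "html".toList ∨ n = "!DOCTYPE".toList ∨ n = "meta".toList)
              ∨ PySem.Chars.endswith tc ['/'] = true then parseB fuel rest name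
          else
            match parseB fuel rest (some n) with
            | PRes.err e => PRes.err e
            | PRes.eof names => PRes.eof (n :: names)
            | PRes.ok rest' => parseB fuel rest' name

-- the token comprehension: [c[c.find('<')+1:].strip() for c in chunks[:-1] if '<' in c]
def tokensB (chunks : List (List Char)) : List (List Char) :=
  chunks.dropLast.filterMap fun c =>
    if PySem.Chars.isIn ['<'] c then
      some (PySem.Chars.strip (PySem.List.slice c (some (PySem.Chars.find c ['<'] + 1)) none))
    else none

-- chunks = html_code.split('>'); split always returns a nonempty list, so chunks[-1] is getLastD.
-- The top-level _parse call never returns 'ok' (its name is None, which matches no close tag);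
-- that match arm is unreachable.
def check_html_closing_tags_alt (html_code : String) : String :=
  let chunks := PySem.Chars.splitOn html_code.toList ['>']
  let tokens := tokensB chunks
  match parseB (tokens.length + 1) tokens none with
  | PRes.err e => e
  | PRes.ok _ => ""
  | PRes.eof names =>
    if PySem.Chars.isIn ['<'] (chunks.getLastD []) then pvUnclosedMsg
    else if names ≠ [] then
      "未正确闭合的标签: <" ++ String.ofList (PySem.Chars.join [',', ' '] names) ++ ">"
    else "所有标签闭合正确！"

-- ===== PRECONDITION & SPEC =====
-- a tag body whose name part is nonempty after stripping (A's split()[0] does not raise on it)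
def goodTag (t : List Char) : Bool :=
  (if PySem.Chars.startswith (PySem.Chars.strip t) ['/'] then
      PySem.Chars.split₀ ((PySem.Chars.strip t).drop 1)
    else PySem.Chars.split₀ (PySem.Chars.strip t)) ≠ []

-- Pre_ excludes inputs containing an empty tag '<>' / '</ >' (a '<' whose gap up to the first
-- following '>' has an empty name), on which A's (and B's) split()[0] raises IndexError; it also
-- excludes such inputs where A error-returns on an EARLIER bad tag before reaching the empty one —
-- on those both programs return the same error anyway (see cites).
-- positions i < j delimit a tag: '<' at i, the first following '>' at j
def tagSpanAt (cs : List Char) (i j : Nat) : Bool :=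
  decide (i < j) && (cs[i]? == some '<') && (cs[j]? == some '>') &&
  ((List.range j).all fun k => !(decide (i < k) && (cs[k]? == some '>')))

def Pre_check_html_closing_tags (html_code : String) : Prop :=
  ∀ i < html_code.toList.length, ∀ j < html_code.toList.length,
    tagSpanAt html_code.toList i j = true →
    goodTag ((html_code.toList.drop (i + 1)).take (j - i - 1)) = true

instance (html_code : String) : Decidable (Pre_check_html_closing_tags html_code) := by
  unfold Pre_check_html_closing_tags; infer_instance

def pvWitness_check_html_closing_tags : String := "<b></b>"

def Spec_check_html_closing_tags (html_code : String) (out : String) : Prop :=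
  out = check_html_closing_tags_alt html_code
instance (html_code : String) (out : String) : Decidable (Spec_check_html_closing_tags html_code out) := by
  unfold Spec_check_html_closing_tags; infer_instance

-- ===== CLAIM (what is proved, stated in full; the proofs are below) =====
def Claim_equal_check_html_closing_tags : Prop := ∀ (html_code : String), Dom_check_html_closing_tags html_code → Pre_check_html_closing_tags html_code → Spec_check_html_closing_tags html_code (check_html_closing_tags html_code)

-- ===== LEMMAS AND PROOFS =====

theorem isIn_singleton (a : Char) (l : List Char) :
    PySem.Chars.isIn [a] l = true ↔ a ∈ l := by
  rw [PySem.Chars.isIn_iff_infix, List.singleton_infix_iff]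


theorem tagSpanAt_iff (cs : List Char) (i j : Nat) : tagSpanAt cs i j = true ↔
    (i < j ∧ cs[i]? = some '<' ∧ cs[j]? = some '>' ∧ ∀ k < j, i < k → cs[k]? ≠ some '>') := by
  simp only [tagSpanAt, Bool.and_eq_true, decide_eq_true_eq, beq_iff_eq, List.all_eq_true,
    List.mem_range, Bool.not_eq_true', Bool.and_eq_false_iff, decide_eq_false_iff_not,
    Nat.not_lt, beq_eq_false_iff_ne, ne_eq]
  exact ⟨fun ⟨⟨⟨h1, h2⟩, h3⟩, h4⟩ => ⟨h1, h2, h3, fun k hk hik =>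
      (h4 k hk).resolve_left (by omega)⟩,
    fun ⟨h1, h2, h3, h4⟩ => ⟨⟨⟨h1, h2⟩, h3⟩, fun k hk =>
      if h : i < k then Or.inr (h4 k hk h) else Or.inl (by omega)⟩⟩


def scanToks : List Char → List (List Char) × Bool
  | [] => ([], false)
  | c :: rs =>
    if c = '<' then
      match rs.idxOf? '>' with
      | none => ([], true)
      | some j => ((rs.take j) :: (scanToks (rs.drop (j + 1))).1, (scanToks (rs.drop (j + 1))).2)
    else scanToks rs
  termination_by cs => cs.length
  decreasing_by all_goals (simp [List.length_drop]; try omega)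

-- the explicit-stack machine over (stripped) tokens
def runCore : List (List Char) → List (List Char) → Sum String (List (List Char))
  | [], stack => Sum.inr stack
  | t :: ts, stack =>
    match stepA t stack with
    | Sum.inl e => Sum.inl e
    | Sum.inr st => runCore ts st

-- simple recursive characterization of split on the single char '>'
def splitGt : List Char → List (List Char)
  | [] => [[]]
  | c :: rest => if c = '>' then [] :: splitGt rest else (splitGt rest).modifyHead (c :: ·)



-- the explicit-stack machine over (stripped) tokens
theorem loopA_eq_run : ∀ (n : Nat) (cs : List Char), cs.length ≤ n → ∀ (stack : List (List Char)),
    loopA cs stack =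
      (match runCore ((scanToks cs).1.map PySem.Chars.strip) stack with
       | Sum.inl e => e
       | Sum.inr st => if (scanToks cs).2 then pvUnclosedMsg else pvFinal st) := by
  intro n
  induction n with
  | zero =>
    intro cs h stack
    have : cs = [] := List.eq_nil_of_length_eq_zero (by omega)
    subst this
    simp [loopA, scanToks, runCore]
  | succ m ih =>
    intro cs h stack
    match cs with
    | [] => simp [loopA, scanToks, runCore]
    | c :: rs =>
      by_cases hc : c = '<'
      · subst hc
        cases hj : rs.idxOf? '>' with
        | none => simp [loopA, scanToks, hj, runCore]
        | some j =>
          simp only [loopA, scanToks, hj, reduceIte, List.map_cons, runCore]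
          cases hstep : stepA (PySem.Chars.strip (rs.take j)) stack with
          | inl e => simp
          | inr st =>
            simp only []
            apply ih
            simp only [List.length_drop]
            simp only [List.length_cons] at h
            omega
      · simp only [loopA, if_neg hc, scanToks]
        apply ih
        simp only [List.length_cons] at h
        omega

theorem good_scanToks_aux (cs0 : List Char)
    (hpre : ∀ i < cs0.length, ∀ j < cs0.length, tagSpanAt cs0 i j = true →
      goodTag ((cs0.drop (i + 1)).take (j - i - 1)) = true) :
    ∀ (n : Nat) (cs : List Char), cs.length ≤ n → ∀ (r : Nat), cs0.drop r = cs →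
      ∀ t ∈ (scanToks cs).1, goodTag t = true := by
  intro n
  induction n with
  | zero =>
    intro cs h r hdrop t ht
    have : cs = [] := List.eq_nil_of_length_eq_zero (by omega)
    subst this
    simp [scanToks] at ht
  | succ m ih =>
    intro cs h r hdrop t ht
    match cs with
    | [] => simp [scanToks] at ht
    | c :: rs =>
      have hdrop1 : cs0.drop (r + 1) = rs := by
        rw [← List.tail_drop, hdrop]; rfl
      have hlen0 : cs0.length = r + 1 + rs.length := by
        have h1 := congrArg List.length hdrop
        simp only [List.length_drop, List.length_cons] at h1
        omega
      by_cases hc : c = '<'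
      · subst hc
        cases hj : rs.idxOf? '>' with
        | none => simp [scanToks, hj] at ht
        | some j =>
          obtain ⟨hjlt, hjget, hjmin⟩ := List.idxOf?_eq_some_iff.mp hj
          have hsuffix : ∀ k : Nat, cs0[r + 1 + k]? = rs[k]? := by
            intro k
            rw [← hdrop1, List.getElem?_drop]
          simp only [scanToks, hj, reduceIte, List.mem_cons] at ht
          rcases ht with rfl | ht
          · have := hpre r (by omega) (r + 1 + j) (by omega)
              ((tagSpanAt_iff cs0 r (r + 1 + j)).mpr ⟨by omega,
                by rw [show r = r + 0 from rfl, ← List.getElem?_drop, hdrop]; rfl,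
                by rw [hsuffix, List.getElem?_eq_some_iff]; exact ⟨hjlt, hjget⟩,
                by
                  intro k hk1 hk2
                  have hk3 : k = r + 1 + (k - r - 1) := by omega
                  rw [hk3, hsuffix, ne_eq, List.getElem?_eq_some_iff]
                  rintro ⟨hlt, hget⟩
                  exact hjmin _ (by omega) hget⟩)
            rw [hdrop1, show r + 1 + j - r - 1 = j by omega] at this
            exact this
          · exact ih (rs.drop (j + 1)) (by simp only [List.length_drop]; simp only [List.length_cons] at h; omega) (r + j + 2)
              (by rw [show r + j + 2 = (r + 1) + (j + 1) by omega, ← List.drop_drop, hdrop1]) t ht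
      · have : (scanToks (c :: rs)) = scanToks rs := by simp [scanToks, hc]
        rw [this] at ht
        exact ih rs (by simp only [List.length_cons] at h; omega) (r + 1) hdrop1 t ht

theorem find_go_eq (a : Char) : ∀ (t : List Char) (k : Nat),
    PySem.Chars.find.go [a] t k =
      (match t.idxOf? a with
       | none => (-1 : Int)
       | some i => ((i + k : Nat) : Int)) := by
  intro t
  induction t with
  | nil => intro k; simp [PySem.Chars.find.go, List.idxOf?]
  | cons c t ih =>
    intro k
    rw [PySem.Chars.find.go]
    by_cases hc : c = a
    · subst hc
      rw [if_pos (by simp [List.isPrefixOf])]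
      simp [List.idxOf?_cons]
    · rw [if_neg (by simp [List.isPrefixOf]; exact fun he => absurd he.symm hc)]
      rw [ih (k + 1)]
      simp only [List.idxOf?_cons, beq_iff_eq]
      rw [if_neg hc]
      cases h : t.idxOf? a with
      | none => simp
      | some i => simp; ring

theorem find_eq_idxOf? (a : Char) (t : List Char) :
    PySem.Chars.find t [a] =
      (match t.idxOf? a with
       | none => (-1 : Int)
       | some i => (i : Int)) := by
  rw [PySem.Chars.find, find_go_eq]
  cases t.idxOf? a <;> simp


-- the token extractor of tokensB, named
def tokOf (h : List Char) : Option (List Char) :=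
  if PySem.Chars.isIn ['<'] h then
    some (PySem.Chars.strip (PySem.List.slice h (some (PySem.Chars.find h ['<'] + 1)) none))
  else none

theorem tokOf_lt (t : List Char) : tokOf ('<' :: t) = some (PySem.Chars.strip t) := by
  rw [tokOf, if_pos ((isIn_singleton _ _).mpr (by simp))]
  rw [find_eq_idxOf?]
  simp [List.idxOf?_cons]
  rw [show ((1 : Int)) = ((1 : Nat) : Int) by norm_num, PySem.List.slice_from_natCast]
  simp


theorem tokOf_cons (c : Char) (h : List Char) (hc : c ≠ '<') : tokOf (c :: h) = tokOf h := by
  by_cases hm : '<' ∈ h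
  · rw [tokOf, tokOf, if_pos ((isIn_singleton _ _).mpr (by simp [hm])),
      if_pos ((isIn_singleton _ _).mpr hm)]
    rw [find_eq_idxOf?, find_eq_idxOf?]
    cases hk : h.idxOf? '<' with
    | none => exact absurd (List.idxOf?_eq_none_iff.mp hk) (by simpa using hm)
    | some k =>
      simp only [List.idxOf?_cons, beq_iff_eq, if_neg hc, hk, Option.map_some]
      rw [show ((k : Int) + 1) = ((k + 1 : Nat) : Int) by push_cast; ring,
        show (((k + 1 : Nat) : Int) + 1) = ((k + 2 : Nat) : Int) by push_cast; ring,
        PySem.List.slice_from_natCast, PySem.List.slice_from_natCast]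
      simp
  · rw [tokOf, tokOf, if_neg, if_neg]
    · simp only [Bool.not_eq_true]
      exact (Bool.eq_false_iff.mpr (fun hh => hm ((isIn_singleton _ _).mp hh)))
    · simp only [Bool.not_eq_true]
      refine Bool.eq_false_iff.mpr (fun hh => ?_)
      have := (isIn_singleton _ _).mp hh
      simp [hc.symm] at this
      exact hm this

-- simple recursive characterization of split on the single char '>'
theorem splitGt_ne_nil (cs : List Char) : splitGt cs ≠ [] := by
  match cs with
  | [] => simp [splitGt]
  | c :: rest =>
    simp only [splitGt]
    split
    · simp
    · have := splitGt_ne_nil rest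
      cases h : splitGt rest with
      | nil => exact absurd h this
      | cons a t => simp

theorem splitGt_no_gt (l : List Char) (h : '>' ∉ l) : splitGt l = [l] := by
  induction l with
  | nil => rfl
  | cons c t ih =>
    simp only [List.mem_cons, not_or] at h
    simp [splitGt, (show ¬ c = '>' from fun he => h.1 he.symm), ih h.2]

theorem splitGt_append (l rest : List Char) (h : '>' ∉ l) :
    splitGt (l ++ '>' :: rest) = l :: splitGt rest := by
  induction l with
  | nil => simp [splitGt]
  | cons c t ih =>
    simp only [List.mem_cons, not_or] at h
    simp only [List.cons_append, splitGt, if_neg (show ¬ c = '>' from fun he => h.1 he.symm), ih h.2]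
    simp [List.modifyHead]

theorem go_gt : ∀ (fuel : Nat) (l cur : List Char) (acc : List (List Char)), l.length < fuel →
    PySem.Chars.splitOn.go ['>'] fuel l cur acc =
      acc.reverse ++ (splitGt l).modifyHead (cur.reverse ++ ·) := by
  intro fuel
  induction fuel with
  | zero => intro l cur acc h; omega
  | succ f ih =>
    intro l cur acc h
    match l with
    | [] => simp [PySem.Chars.splitOn.go, splitGt]
    | c :: rest =>
      rw [PySem.Chars.splitOn.go]
      by_cases hc : c = '>'
      · subst hc
        rw [if_pos (by simp [List.isPrefixOf])]
        simp only [List.length_cons, List.drop_succ_cons, List.length_nil, List.drop_zero]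
        rw [ih rest [] (cur.reverse :: acc) (by simp at h ⊢; omega)]
        simp [splitGt]
        cases splitGt rest <;> simp
      · rw [if_neg (by simp [List.isPrefixOf]; exact fun he => absurd he.symm hc)]
        
        rw [ih rest (c :: cur) acc (by simp at h ⊢; omega)]
        simp only [splitGt, if_neg hc]
        cases hsp : splitGt rest with
        | nil => exact absurd hsp (splitGt_ne_nil rest)
        | cons a t => simp

theorem splitOn_gt (cs : List Char) : PySem.Chars.splitOn cs ['>'] = splitGt cs := by
  rw [PySem.Chars.splitOn, go_gt (cs.length + 1) cs [] [] (by omega)]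
  cases h : splitGt cs with
  | nil => exact absurd h (splitGt_ne_nil cs)
  | cons a t => simp

theorem getLastD_cons_of_ne_nil {α : Type} (a : α) (t : List α) (d : α) (h : t ≠ []) :
    (a :: t).getLastD d = t.getLastD d := by
  cases t with
  | nil => exact absurd rfl h
  | cons b u => simp [List.getLastD]


theorem tokens_of_splitGt : ∀ (n : Nat) (cs : List Char), cs.length ≤ n →
    tokensB (splitGt cs) = (scanToks cs).1.map PySem.Chars.strip ∧
    PySem.Chars.isIn ['<'] ((splitGt cs).getLastD []) = (scanToks cs).2 := by
  intro n
  induction n with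
  | zero =>
    intro cs h
    have : cs = [] := List.eq_nil_of_length_eq_zero (by omega)
    subst this
    exact ⟨by simp [splitGt, tokensB, scanToks], by simp [splitGt, scanToks]; decide⟩
  | succ m ih =>
    intro cs h
    match cs with
    | [] => exact ⟨by simp [splitGt, tokensB, scanToks], by simp [splitGt, scanToks]; decide⟩
    | c :: rs =>
      simp only [List.length_cons] at h
      by_cases hc : c = '<'
      · subst hc
        cases hj : rs.idxOf? '>' with
        | none =>
          have hnotin : '>' ∉ rs := by
            intro hm
            rcases List.idxOf?_eq_none_iff.mp hj with h'
            exact h' hm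
          have hall : '>' ∉ ('<' :: rs) := by simp [hnotin]
          rw [splitGt_no_gt _ hall]
          constructor
          · simp [tokensB, scanToks, hj]
          · simp only [List.getLastD, scanToks, hj]
            exact (isIn_singleton _ _).mpr (by simp)
        | some j =>
          obtain ⟨hjlt, hjget, hjmin⟩ := List.idxOf?_eq_some_iff.mp hj
          have hdecomp : rs = rs.take j ++ '>' :: rs.drop (j + 1) := by
            conv_lhs => rw [← List.take_append_drop j rs]
            congr 1
            rw [List.drop_eq_getElem_cons hjlt, hjget]
          have hnotin : '>' ∉ ('<' :: rs.take j) := by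
            simp only [List.mem_cons, not_or]
            refine ⟨by decide, fun hm => ?_⟩
            obtain ⟨k, hk, hkget⟩ := List.mem_iff_getElem.mp hm
            rw [List.getElem_take] at hkget
            exact hjmin k (by simp at hk; omega) hkget
          have hsplit : splitGt ('<' :: rs) = ('<' :: rs.take j) :: splitGt (rs.drop (j + 1)) := by
            conv_lhs => rw [show ('<' :: rs) = ('<' :: rs.take j) ++ '>' :: rs.drop (j + 1) by
              simp only [List.cons_append]; rw [← hdecomp]]
            exact splitGt_append _ _ hnotin
          have hlen : (rs.drop (j + 1)).length ≤ m := by simp [List.length_drop]; omega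
          obtain ⟨ih1, ih2⟩ := ih (rs.drop (j + 1)) hlen
          have hX := splitGt_ne_nil (rs.drop (j + 1))
          constructor
          · rw [hsplit]
            simp only [tokensB] at ih1 ⊢
            rw [List.dropLast_cons_of_ne_nil hX, List.filterMap_cons]
            have htok := tokOf_lt (rs.take j)
            simp only [tokOf] at htok
            rw [htok]
            simp only [scanToks, hj, reduceIte, List.map_cons]
            rw [ih1]
          · rw [hsplit, getLastD_cons_of_ne_nil _ _ _ hX, ih2]
            simp [scanToks, hj]
      · have hscan : scanToks (c :: rs) = scanToks rs := by simp [scanToks, hc]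
        obtain ⟨ih1, ih2⟩ := ih rs (by omega)
        have hXne := splitGt_ne_nil rs
        rw [hscan, ← ih1, ← ih2]
        by_cases hgt : c = '>'
        · subst hgt
          simp only [splitGt, reduceIte]
          constructor
          · rw [tokensB, List.dropLast_cons_of_ne_nil hXne, List.filterMap_cons]
            have h0 : tokOf [] = none := by decide
            simp only [tokOf] at h0
            rw [tokensB, h0]
          · rw [getLastD_cons_of_ne_nil _ _ _ hXne]
        · simp only [splitGt, if_neg hgt]
          cases hX : splitGt rs with
          | nil => exact absurd hX hXne
          | cons hd tl =>
            simp only [List.modifyHead]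
            cases htl : tl with
            | nil =>
              constructor
              · simp [tokensB]
              · have hl1 : ((c :: hd) :: ([] : List (List Char))).getLastD [] = c :: hd := rfl
                have hl2 : (hd :: ([] : List (List Char))).getLastD [] = hd := rfl
                rw [hl1, hl2]
                by_cases hm : '<' ∈ hd
                · rw [(isIn_singleton _ _).mpr (by simp [hm]), (isIn_singleton _ _).mpr hm]
                · have h1 : PySem.Chars.isIn ['<'] hd = false :=
                    Bool.eq_false_iff.mpr (fun hh => hm ((isIn_singleton _ _).mp hh))
                  have h2 : PySem.Chars.isIn ['<'] (c :: hd) = false := Bool.eq_false_iff.mpr (fun hh => by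
                    have hmem := (isIn_singleton _ _).mp hh
                    simp [(show ¬ '<' = c from fun he => hc he.symm)] at hmem
                    exact hm hmem)
                  rw [h1, h2]
            | cons x y =>
              constructor
              · rw [tokensB, tokensB]
                simp only [List.dropLast_cons₂, List.filterMap_cons]
                have htok := tokOf_cons c hd hc
                simp only [tokOf] at htok
                rw [htok]
              · rw [getLastD_cons_of_ne_nil _ _ _ (List.cons_ne_nil x y),
                  getLastD_cons_of_ne_nil _ _ _ (List.cons_ne_nil x y)]

-- goodness of a stripped token, as stepA/parseB branch on it
def goodTok (t : List Char) : Bool :=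
  (if PySem.Chars.startswith t ['/'] then PySem.Chars.split₀ (t.drop 1)
   else PySem.Chars.split₀ t) ≠ []

def stkOf (name : Option (List Char)) (ctx : List (List Char)) : List (List Char) :=
  match name with
  | none => ctx
  | some n => n :: ctx


def SimPost (toks : List (List Char)) (name : Option (List Char)) (ctx : List (List Char))
    (r : PRes) : Prop :=
  match r with
  | PRes.err e => runCore toks (stkOf name ctx) = Sum.inl e
  | PRes.ok rest => ∃ n, name = some n ∧ runCore toks (n :: ctx) = runCore rest ctx ∧
      rest.length < toks.length ∧ rest <:+ toks
  | PRes.eof names => runCore toks (stkOf name ctx) = Sum.inr (names.reverse ++ stkOf name ctx)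

theorem simpost_glue (tc : List Char) (ts rest : List (List Char)) (name : Option (List Char))
    (ctx : List (List Char)) (r : PRes)
    (hch : runCore (tc :: ts) (stkOf name ctx) = runCore rest (stkOf name ctx))
    (hlt : rest.length < (tc :: ts).length) (hsuf : rest <:+ ts)
    (h : SimPost rest name ctx r) : SimPost (tc :: ts) name ctx r := by
  cases r with
  | err e => exact hch.trans h
  | eof names => exact hch.trans h
  | ok rest2 =>
    obtain ⟨n, rfl, hrun, hl, hs⟩ := h
    exact ⟨n, rfl, (show runCore (tc :: ts) (n :: ctx) = runCore rest (n :: ctx) from hch).trans hrun,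
      by omega, (hs.trans hsuf).trans (List.suffix_cons _ _)⟩


theorem parse_sim : ∀ (fuel : Nat) (toks : List (List Char)) (name : Option (List Char))
    (ctx : List (List Char)), toks.length < fuel →
    (∀ t ∈ toks, goodTok t = true) → (name = none → ctx = []) →
    SimPost toks name ctx (parseB fuel toks name) := by
  intro fuel
  induction fuel with
  | zero => intro toks name ctx h; omega
  | succ f ih =>
    intro toks name ctx hlen hgood hctx
    match toks with
    | [] => simp [parseB, SimPost, runCore]
    | tc :: ts =>
      have hlen' : ts.length < f := by simp only [List.length_cons] at hlen; omega
      have hgood_tc : goodTok tc = true := hgood tc (List.mem_cons_self)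
      have hgood_ts : ∀ t ∈ ts, goodTok t = true := fun t ht => hgood t (List.mem_cons_of_mem _ ht)
      by_cases hsw : PySem.Chars.startswith tc ['/'] = true
      · -- close tag
        cases hsp : PySem.Chars.split₀ (tc.drop 1) with
        | nil =>
          exfalso
          simp only [goodTok, if_pos hsw, hsp] at hgood_tc
          simp at hgood_tc
        | cons n rest0 =>
          rw [List.drop_one] at hsp
          by_cases hname : name = some n
          · subst hname
            simp only [parseB, List.drop_one, if_pos hsw, hsp]
            refine ⟨n, rfl, ?_, by simp, List.suffix_cons _ _⟩
            simp [runCore, stepA, hsw, hsp]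
          · have hstep : stepA tc (stkOf name ctx) =
                (if n = "head".toList ∨ n = "html".toList then Sum.inr (stkOf name ctx)
                 else Sum.inl (pvTagErr n)) := by
              cases name with
              | none =>
                simp [hctx rfl, stkOf, stepA, hsw, hsp]
              | some m =>
                have hmn : ¬ m = n := fun he => hname (by rw [he])
                simp [stkOf, stepA, hsw, hsp, hmn]
            by_cases hhh : n = "head".toList ∨ n = "html".toList
            · rw [if_pos hhh] at hstep
              simp only [parseB, List.drop_one, if_pos hsw, hsp, if_neg hname, if_pos hhh]
              exact simpost_glue tc ts ts name ctx _
                (by simp only [runCore, hstep]) (by simp) List.suffix_rfl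
                (ih ts name ctx hlen' hgood_ts hctx)
            · rw [if_neg hhh] at hstep
              simp only [parseB, List.drop_one, if_pos hsw, hsp, if_neg hname, if_neg hhh]
              show runCore (tc :: ts) (stkOf name ctx) = Sum.inl (pvTagErr n)
              simp only [runCore, hstep]
      · -- open tag
        cases hsp : PySem.Chars.split₀ tc with
        | nil =>
          exfalso
          simp only [goodTok, if_neg hsw, hsp] at hgood_tc
          simp at hgood_tc
        | cons n rest0 =>
          simp only [Bool.not_eq_true] at hsw
          have hswF : ¬ PySem.Chars.startswith tc ['/'] = true := by simp [hsw]
          by_cases hC : (n = "head".toList ∨ n = "html".toList ∨ n = "!DOCTYPE".toList ∨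
              n = "meta".toList) ∨ PySem.Chars.endswith tc ['/'] = true
          · -- skipped tag (void or self-closing): stack unchanged
            have hstep : stepA tc (stkOf name ctx) = Sum.inr (stkOf name ctx) := by
              simp only [stepA, if_neg hswF, hsp]
              rw [if_neg]
              rintro ⟨⟨h1, h2, h3, h4⟩, h5⟩
              rcases hC with (h | h | h | h) | h
              · exact h1 h
              · exact h2 h
              · exact h3 h
              · exact h4 h
              · rw [h] at h5; exact absurd h5 (by simp)
            simp only [parseB, if_neg hswF, hsp, if_pos hC]
            exact simpost_glue tc ts ts name ctx _
              (by simp only [runCore, hstep]) (by simp) List.suffix_rfl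
              (ih ts name ctx hlen' hgood_ts hctx)
          · -- pushed tag: recurse
            have hstep : stepA tc (stkOf name ctx) = Sum.inr (n :: stkOf name ctx) := by
              simp only [stepA, if_neg hswF, hsp]
              rw [if_pos]
              push_neg at hC
              exact ⟨⟨hC.1.1, hC.1.2.1, hC.1.2.2.1, hC.1.2.2.2⟩, by
                simpa using hC.2⟩
            have hrun : runCore (tc :: ts) (stkOf name ctx) = runCore ts (n :: stkOf name ctx) := by
              simp only [runCore, hstep]
            simp only [parseB, if_neg hswF, hsp, if_neg hC]
            have hinner := ih ts (some n) (stkOf name ctx) hlen' hgood_ts (by simp)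
            cases hp : parseB f ts (some n) with
            | err e =>
              rw [hp] at hinner
              have hinner2 : runCore ts (n :: stkOf name ctx) = Sum.inl e := hinner
              show runCore (tc :: ts) (stkOf name ctx) = Sum.inl e
              exact hrun.trans hinner2
            | eof names =>
              rw [hp] at hinner
              have hinner2 : runCore ts (n :: stkOf name ctx) =
                  Sum.inr (names.reverse ++ (n :: stkOf name ctx)) := hinner
              show runCore (tc :: ts) (stkOf name ctx) =
                Sum.inr ((n :: names).reverse ++ stkOf name ctx)
              rw [hrun, hinner2]
              simp
            | ok rest =>
              rw [hp] at hinner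
              obtain ⟨n2, hn2, hrun2, hlt2, hsuf2⟩ := hinner
              have hn2' : n2 = n := by injection hn2 with h; exact h.symm
              rw [hn2'] at hrun2
              have hch : runCore (tc :: ts) (stkOf name ctx) = runCore rest (stkOf name ctx) :=
                hrun.trans hrun2
              have hgood_rest : ∀ t ∈ rest, goodTok t = true :=
                fun t ht => hgood_ts t (hsuf2.subset ht)
              exact simpost_glue tc ts rest name ctx _
                hch (by simp only [List.length_cons]; omega) hsuf2
                (ih rest name ctx (by omega) hgood_rest hctx)

-- ===== VERDICT (by name: the statement is the Claim_ definition above) =====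
theorem check_html_closing_tags_spec : Claim_equal_check_html_closing_tags := by
  unfold Claim_equal_check_html_closing_tags
  intro html_code _ hpre
  unfold Spec_check_html_closing_tags check_html_closing_tags check_html_closing_tags_alt
  have hchunks : PySem.Chars.splitOn html_code.toList ['>'] = splitGt html_code.toList :=
    splitOn_gt html_code.toList
  obtain ⟨htok, hlast⟩ := tokens_of_splitGt html_code.toList.length html_code.toList le_rfl
  have hA := loopA_eq_run html_code.toList.length html_code.toList le_rfl []
  have hgoodA : ∀ t ∈ (scanToks html_code.toList).1, goodTag t = true :=
    good_scanToks_aux html_code.toList hpre html_code.toList.length html_code.toList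
      (by omega) 0 (by simp)
  have hgood : ∀ u ∈ (scanToks html_code.toList).1.map PySem.Chars.strip, goodTok u = true := by
    intro u hu
    obtain ⟨t, ht, rfl⟩ := List.mem_map.mp hu
    exact hgoodA t ht
  have hsim := parse_sim (((scanToks html_code.toList).1.map PySem.Chars.strip).length + 1)
    ((scanToks html_code.toList).1.map PySem.Chars.strip) none [] (by omega) hgood (fun _ => rfl)
  simp only [hchunks, htok]
  cases hp : parseB (((scanToks html_code.toList).1.map PySem.Chars.strip).length + 1)
      ((scanToks html_code.toList).1.map PySem.Chars.strip) none with
  | err e =>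
    rw [hp] at hsim
    have he : runCore ((scanToks html_code.toList).1.map PySem.Chars.strip) [] = Sum.inl e := hsim
    rw [hA, he]
  | ok rest =>
    rw [hp] at hsim
    obtain ⟨n, hn, -⟩ := hsim
    exact absurd hn (by simp)
  | eof names =>
    rw [hp] at hsim
    have he : runCore ((scanToks html_code.toList).1.map PySem.Chars.strip) [] =
        Sum.inr (names.reverse ++ []) := hsim
    rw [List.append_nil] at he
    rw [hA, he, hlast]
    cases hd : (scanToks html_code.toList).2 with
    | true => simp
    | false =>
      simp only [Bool.false_eq_true, if_false]
      rw [pvFinal]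
      by_cases hn : names = []
      · subst hn; simp
      · rw [if_pos (by simpa using hn), if_pos hn]
        simp
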